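-- pv_equiv track=rewrite | github.com/derwind/fontUtils | misc_scripts/gpos_analyzer.py | _order_classes
-- ===== SOURCE A (Python) =====
-- def _order_classes(classDefs):
--     d = {}
--     for gname, classValue in classDefs.items():
--         if not classValue in d:
--             d[classValue] = []
--         d[classValue].append(gname)
--     for classValue, gnames in d.items():
--         d[classValue] = sorted(gnames)
--     # for python 2, 'lambda (classValue,gnames): gnames[0]' is also valid
--     return sorted(d.items(), key=lambda classValue_gnames: classValue_gnames[1][0])
-- ===== SOURCE B (Python) =====
-- def _order_classes(classDefs):
--     d = {}
--     for gname in sorted(classDefs):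
--         d.setdefault(classDefs[gname], []).append(gname)
--     return list(d.items())
-- ===== Notes on version B (the rewrite author's own statement) =====
-- stated objective: simpler
-- what changed: Sort the glyph names once up front and group into an insertion-ordered dict; since names arrive in ascending order each bucket is born sorted and each class first appears at its minimal name, so the per-bucket sort pass and the final sort of the groups both disappear.
import Mathlib
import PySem

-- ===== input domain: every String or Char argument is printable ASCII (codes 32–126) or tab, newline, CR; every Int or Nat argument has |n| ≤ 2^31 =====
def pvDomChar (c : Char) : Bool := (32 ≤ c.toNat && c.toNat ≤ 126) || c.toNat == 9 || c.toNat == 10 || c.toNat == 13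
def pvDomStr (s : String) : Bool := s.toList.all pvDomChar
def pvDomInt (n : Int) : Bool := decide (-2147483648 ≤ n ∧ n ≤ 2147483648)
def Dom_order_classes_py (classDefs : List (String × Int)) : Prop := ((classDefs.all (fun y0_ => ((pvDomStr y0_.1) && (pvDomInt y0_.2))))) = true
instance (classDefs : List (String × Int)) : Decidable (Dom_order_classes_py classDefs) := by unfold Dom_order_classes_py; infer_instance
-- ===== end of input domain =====

-- B sorts the glyph names once up front and groups them into an insertion-ordered dict,
-- so the per-bucket sorts and the final sort of the groups of A disappear (objective: simpler).


-- ===== PORT A =====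
-- literal port of _order_classes: group names by class value in input order,
-- sort each bucket, then sort the (class, names) pairs by their first name.
-- gnames[0] is ported as .headI: exact, every bucket is nonempty when it is read.
def order_classes_py (classDefs : List (String × Int)) : List (Int × List String) :=
  let d : PySem.Dict Int (List String) :=
    classDefs.foldl (fun d p =>
      let d := if d.contains p.2 = false then d.insert p.2 ([] : List String) else d
      d.modify p.2 [] (fun gs => gs ++ [p.1])) PySem.Dict.empty
  let d := d.items.foldl (fun d' p => d'.insert p.1 (PySem.List.sorted p.2 (fun x => x))) d
  PySem.List.sorted d.items (fun p => p.2.headI)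

-- ===== PORT B =====
-- port of B: iterate the glyph names in sorted order, look each one up in the input
-- dict and append it to its class bucket (setdefault(c, []).append(g) = modify c [] (· ++ [g]));
-- return the dict's items. classDefs[gname] is ported as getD with default 0: exact,
-- gname is always a key of classDefs.
def order_classes_py_alt (classDefs : List (String × Int)) : List (Int × List String) :=
  let cd : PySem.Dict String Int := PySem.Dict.mk classDefs
  ((PySem.List.sorted (classDefs.map Prod.fst) (fun x => x)).foldl
    (fun d g => d.modify (cd.getD g 0) [] (fun gs => gs ++ [g])) PySem.Dict.empty).items

-- ===== PRECONDITION & SPEC =====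
-- The argument encodes a Python dict, whose keys (the glyph names) are necessarily
-- distinct; association lists repeating a key do not arise from any dict input.
def Pre_order_classes_py (classDefs : List (String × Int)) : Prop :=
  (classDefs.map Prod.fst).Nodup
instance (classDefs : List (String × Int)) : Decidable (Pre_order_classes_py classDefs) := by unfold Pre_order_classes_py; infer_instance

def pvWitness_order_classes_py : (List (String × Int)) := [("b", 2), ("a", 1), ("c", 1), ("d", 2)]

def Spec_order_classes_py (classDefs : List (String × Int)) (out : List (Int × List String)) : Prop := out = order_classes_py_alt classDefs
instance (classDefs : List (String × Int)) (out : List (Int × List String)) : Decidable (Spec_order_classes_py classDefs out) := by unfold Spec_order_classes_py; infer_instance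

-- ===== CLAIM (what is proved, stated in full; the proofs are below) =====
def Claim_equal_order_classes_py : Prop := ∀ (classDefs : List (String × Int)), Dom_order_classes_py classDefs → Pre_order_classes_py classDefs → Spec_order_classes_py classDefs (order_classes_py classDefs)

-- ===== LEMMAS AND PROOFS =====

-- A's conditional-insert-then-append step is exactly a modify with default [].
theorem stepA_eq_modify (d : PySem.Dict Int (List String)) (c : Int) (g : String) :
    (if d.contains c = false then d.insert c ([] : List String) else d).modify c []
      (fun gs => gs ++ [g]) = d.modify c [] (fun gs => gs ++ [g]) := by
  by_cases h : d.contains c = false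
  · simp only [h, if_true, PySem.Dict.modify, PySem.Dict.getD_insert_self,
      PySem.Dict.insert_insert_self, PySem.Dict.getD_of_not_contains d ([] : List String) h]
  · simp [h]

-- items of a grouping fold from the empty dict: the distinct keys in first-appearance
-- order, each paired with the values of its group in traversal order.
theorem items_groupFold {α : Type} (l : List α) (key : α → Int) (val : α → String) :
    (l.foldl (fun d x => d.modify (key x) ([] : List String) (fun gs => gs ++ [val x]))
        PySem.Dict.empty).items
      = (PySem.Set.ofList (l.map key)).map
          (fun c => (c, (l.filter (fun x => key x == c)).map val)) := by
  set D := (l.foldl (fun d x => d.modify (key x) ([] : List String) (fun gs => gs ++ [val x]))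
        PySem.Dict.empty) with hD
  have hkeys : D.keys = PySem.Set.ofList (l.map key) := by
    rw [hD, PySem.Dict.keys_foldl_modify_key l key ([] : List String)
      (fun _ x => fun gs => gs ++ [val x])]
    simp [PySem.Dict.keys_empty, PySem.Set.update_nil_left]
  have hnd : D.keys.Nodup := by
    rw [hkeys]; exact PySem.Set.nodup_ofList _
  have hgetD : ∀ c, D.getD c [] = (l.filter (fun x => key x == c)).map val := by
    intro c
    have := PySem.Dict.getD_foldl_modify_append (l.map (fun x => (key x, val x)))
      PySem.Dict.empty c
    rw [List.foldl_map] at this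
    rw [hD]
    simpa [List.filter_map, Function.comp] using this
  rw [PySem.Dict.items_eq_map_keys D hnd [], hkeys]
  exact List.map_congr_left (fun c _ => by rw [hgetD c])

-- in a list with distinct keys, searching a member's key finds that member.
theorem find?_self_of_nodup_keys {κ ν : Type} [BEq κ] [LawfulBEq κ] :
    ∀ (l : List (κ × ν)) (q : κ × ν), q ∈ l → (l.map Prod.fst).Nodup →
      l.find? (fun p => p.1 == q.1) = some q := by
  intro l
  induction l with
  | nil => intro q hq; simp at hq
  | cons r t ih =>
    intro q hq hnd
    simp only [List.map_cons, List.nodup_cons] at hnd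
    rcases List.mem_cons.mp hq with rfl | hqt
    · simp [List.find?]
    · have hne : (r.1 == q.1) = false := by
        rw [beq_eq_false_iff_ne]
        intro he
        exact hnd.1 (he ▸ List.mem_map_of_mem hqt (f := Prod.fst))
      simp [List.find?, hne, ih q hqt hnd.2]

-- a fold that re-inserts at existing, distinct keys rewrites the items pointwise.
theorem items_overwriteFold {κ ν : Type} [BEq κ] [LawfulBEq κ] (f : ν → ν) :
    ∀ (l : List (κ × ν)) (d : PySem.Dict κ ν), d.keys.Nodup →
      (∀ p ∈ l, d.contains p.1 = true) → (l.map Prod.fst).Nodup →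
      (l.foldl (fun d' p => d'.insert p.1 (f p.2)) d).items
        = d.items.map (fun q =>
            match l.find? (fun p => p.1 == q.1) with
            | some p => (q.1, f p.2)
            | none => q) := by
  intro l
  induction l with
  | nil => intro d _ _ _; simp
  | cons r t ih =>
    intro d hnd hcont hlnd
    simp only [List.map_cons, List.nodup_cons] at hlnd
    have hcr : d.contains r.1 = true := hcont r (List.mem_cons_self)
    have h1 : (d.insert r.1 (f r.2)).keys.Nodup := by
      rw [PySem.Dict.keys_insert_of_contains d (f r.2) hcr]; exact hnd
    have h2 : ∀ p ∈ t, (d.insert r.1 (f r.2)).contains p.1 = true := by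
      intro p hp
      rw [PySem.Dict.contains_insert]
      simp [hcont p (List.mem_cons_of_mem r hp)]
    have := ih (d.insert r.1 (f r.2)) h1 h2 hlnd.2
    simp only [List.foldl_cons]
    rw [this, PySem.Dict.items_insert_of_contains d (f r.2) hcr, List.map_map]
    apply List.map_congr_left
    intro q hq
    by_cases he : q.1 = r.1
    · have hfind : t.find? (fun p => p.1 == r.1) = none := by
        rw [List.find?_eq_none]
        intro p hp
        simp only [beq_iff_eq]
        intro hpe
        exact hlnd.1 (hpe ▸ List.mem_map_of_mem hp (f := Prod.fst))
      simp [Function.comp, he, List.find?, hfind]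
    · have hne : (q.1 == r.1) = false := by rw [beq_eq_false_iff_ne]; exact he
      have hne' : (r.1 == q.1) = false := by
        rw [beq_eq_false_iff_ne]; exact fun hh => he hh.symm
      simp [Function.comp, hne, hne', List.find?]

-- the second loop of A over its own items: items mapped pointwise.
theorem items_selfOverwrite {κ ν : Type} [BEq κ] [LawfulBEq κ] (f : ν → ν)
    (d : PySem.Dict κ ν) (h : d.keys.Nodup) :
    (d.items.foldl (fun d' p => d'.insert p.1 (f p.2)) d).items
      = d.items.map (fun q => (q.1, f q.2)) := by
  have hk : d.items.map Prod.fst = d.keys := rfl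
  rw [items_overwriteFold f d.items d h
    (fun p hp => (PySem.Dict.contains_iff_mem_keys d p.1).mpr (PySem.Dict.mem_keys_of_mem_items d hp))
    (hk ▸ h)]
  apply List.map_congr_left
  intro q hq
  rw [find?_self_of_nodup_keys d.items q hq (hk ▸ h)]

-- looking a pair's key up in the dict the input list encodes returns its value.
theorem lookup_mem (classDefs : List (String × Int)) (h : (classDefs.map Prod.fst).Nodup)
    (p : String × Int) (hp : p ∈ classDefs) :
    (PySem.Dict.mk classDefs).getD p.1 0 = p.2 := by
  have hk : (PySem.Dict.mk classDefs).keys.Nodup := h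
  exact PySem.Dict.getD_of_mem_items (PySem.Dict.mk classDefs) hp hk 0

-- heads of the buckets of a grouping fold over a strictly sorted list are strictly
-- increasing in first-appearance order of the keys.
theorem head_pairwise (ns : List String) (f : String → Int) (h : ns.Pairwise (· < ·)) :
    ((PySem.Set.ofList (ns.map f)).map
        (fun c => (c, ns.filter (fun g => f g == c)))).Pairwise
      (fun p q => p.2.headI < q.2.headI) := by
  rw [List.pairwise_map]
  induction ns with
  | nil => simp
  | cons g t ih =>
    rw [List.pairwise_cons] at h
    obtain ⟨hg, ht⟩ := h
    rw [List.map_cons, PySem.Set.ofList_cons, List.pairwise_cons]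
    have hmem : ∀ c' ∈ (PySem.Set.ofList (t.map f)).discard (f g),
        c' ∈ t.map f ∧ c' ≠ f g := by
      intro c' hc'
      have := (PySem.Set.mem_discard _ _ _).mp hc'
      exact ⟨(PySem.Set.mem_ofList _ _).mp this.1, this.2⟩
    have hfilter : ∀ c', c' ≠ f g →
        (g :: t).filter (fun x => f x == c') = t.filter (fun x => f x == c') := by
      intro c' hne
      have : (f g == c') = false := by rw [beq_eq_false_iff_ne]; exact fun hh => hne hh.symm
      simp [List.filter, this]
    constructor
    · intro c' hc'
      obtain ⟨hmem', hne⟩ := hmem c' hc'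
      obtain ⟨y, hy, hfy⟩ := List.mem_map.mp hmem'
      have hself : (g :: t).filter (fun x => f x == f g)
          = g :: t.filter (fun x => f x == f g) := by
        simp [List.filter]
      rw [hself, hfilter c' hne]
      have hyf : y ∈ t.filter (fun x => f x == c') := List.mem_filter.mpr ⟨hy, by simp [hfy]⟩
      cases hfil : t.filter (fun x => f x == c') with
      | nil => rw [hfil] at hyf; simp at hyf
      | cons a as =>
        have ha : a ∈ t.filter (fun x => f x == c') := by rw [hfil]; exact List.mem_cons_self
        have hat : a ∈ t := (List.mem_filter.mp ha).1
        simpa using hg a hat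
    · have hsub : ((PySem.Set.ofList (t.map f)).discard (f g)).Sublist
          (PySem.Set.ofList (t.map f)) := List.filter_sublist
      have := (ih ht).sublist hsub
      refine List.Pairwise.imp_of_mem ?_ this
      intro c' c'' hc' hc'' hr
      rw [hfilter c' (hmem c' hc').2, hfilter c'' (hmem c'' hc'').2]
      exact hr

-- ===== VERDICT (by name: the statement is the Claim_ definition above) =====
theorem order_classes_py_spec : Claim_equal_order_classes_py := by
  intro classDefs _ hpre
  unfold Spec_order_classes_py
  unfold Pre_order_classes_py at hpre
  set names := classDefs.map Prod.fst with hnames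
  set lk : String → Int := fun g => (PySem.Dict.mk classDefs).getD g 0 with hlk
  set ns := PySem.List.sorted names (fun x => x) with hns
  have hperm : ns.Perm names := PySem.List.sorted_perm names (fun x => x) false
  have hnodup : ns.Nodup := hperm.nodup_iff.mpr hpre
  have hle : ns.Pairwise (fun a b => a ≤ b) := PySem.List.sorted_pairwise names (fun x => x)
  have hlt : ns.Pairwise (· < ·) := (hle.and hnodup).imp (fun hab => lt_of_le_of_ne hab.1 hab.2)
  have hlk_mem : ∀ p ∈ classDefs, lk p.1 = p.2 := fun p hp => lookup_mem classDefs hpre p hp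
  -- B side
  have hB : order_classes_py_alt classDefs
      = (PySem.Set.ofList (ns.map lk)).map (fun c => (c, ns.filter (fun g => lk g == c))) := by
    show ((PySem.List.sorted (classDefs.map Prod.fst) (fun x => x)).foldl
      (fun d g => d.modify ((PySem.Dict.mk classDefs).getD g 0) [] (fun gs => gs ++ [g]))
      PySem.Dict.empty).items = _
    rw [items_groupFold _ (fun g => (PySem.Dict.mk classDefs).getD g 0) (fun g => g)]
    apply List.map_congr_left; intro c _; simp only [List.map_id']; rfl
  -- groups agree
  have hgrp : ∀ c : Int,
      PySem.List.sorted ((classDefs.filter (fun p => p.2 == c)).map Prod.fst) (fun x => x)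
        = ns.filter (fun g => lk g == c) := by
    intro c
    apply PySem.List.sorted_eq_of_perm_of_pairwise_lt
    · have h1 : (ns.filter (fun g => lk g == c)).Perm (names.filter (fun g => lk g == c)) :=
        hperm.filter _
      have h2 : names.filter (fun g => lk g == c)
          = (classDefs.filter (fun p => lk p.1 == c)).map Prod.fst := by
        rw [hnames, List.filter_map]; rfl
      have h3 : classDefs.filter (fun p => lk p.1 == c) = classDefs.filter (fun p => p.2 == c) := by
        apply List.filter_congr; intro p hp; rw [hlk_mem p hp]
      rw [h2, h3] at h1; exact h1
    · exact List.Pairwise.sublist List.filter_sublist hlt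
  -- key sets are a permutation of each other
  have hkeysperm : (PySem.Set.ofList (ns.map lk)).Perm
      (PySem.Set.ofList (classDefs.map Prod.snd)) := by
    have h2 : names.map lk = classDefs.map Prod.snd := by
      rw [hnames, List.map_map]; apply List.map_congr_left; intro p hp; exact hlk_mem p hp
    refine (List.perm_ext_iff_of_nodup (PySem.Set.nodup_ofList _) (PySem.Set.nodup_ofList _)).mpr ?_
    intro a
    rw [PySem.Set.mem_ofList, PySem.Set.mem_ofList, ← h2]
    exact ⟨fun ha => (hperm.map lk).mem_iff.mp ha, fun ha => (hperm.map lk).mem_iff.mpr ha⟩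
  -- A side
  have hfun : (fun (d : PySem.Dict Int (List String)) (p : String × Int) =>
      (if d.contains p.2 = false then d.insert p.2 ([] : List String) else d).modify p.2 []
        (fun gs => gs ++ [p.1]))
      = (fun d p => d.modify p.2 [] (fun gs => gs ++ [p.1])) := by
    funext d p; exact stepA_eq_modify d p.2 p.1
  set dA := classDefs.foldl (fun d p => d.modify p.2 [] (fun gs => gs ++ [p.1]))
    PySem.Dict.empty with hdA
  have hAstart : order_classes_py classDefs
      = PySem.List.sorted ((dA.items.foldl
          (fun d' p => d'.insert p.1 (PySem.List.sorted p.2 (fun x => x))) dA).items)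
          (fun p => p.2.headI) := by
    show PySem.List.sorted (((classDefs.foldl (fun d p =>
      (if d.contains p.2 = false then d.insert p.2 ([] : List String) else d).modify p.2 []
        (fun gs => gs ++ [p.1])) PySem.Dict.empty).items.foldl
          (fun d' p => d'.insert p.1 (PySem.List.sorted p.2 (fun x => x)))
          (classDefs.foldl (fun d p =>
      (if d.contains p.2 = false then d.insert p.2 ([] : List String) else d).modify p.2 []
        (fun gs => gs ++ [p.1])) PySem.Dict.empty)).items) (fun p => p.2.headI) = _
    rw [hfun]
  have hAnodup : dA.keys.Nodup := by
    rw [hdA]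
    exact PySem.Dict.nodup_keys_foldl_modify_key classDefs Prod.snd []
      (fun _ p => fun gs => gs ++ [p.1]) PySem.Dict.empty (PySem.Dict.nodup_keys_empty)
  have hAitems : dA.items = (PySem.Set.ofList (classDefs.map Prod.snd)).map
      (fun c => (c, (classDefs.filter (fun p => p.2 == c)).map Prod.fst)) :=
    items_groupFold classDefs Prod.snd Prod.fst
  have hd2 := items_selfOverwrite (fun v => PySem.List.sorted v (fun x => x)) dA hAnodup
  rw [hAstart, hd2, hAitems, List.map_map, hB]
  apply PySem.List.sorted_eq_of_perm_of_pairwise_lt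
  · have heq : (PySem.Set.ofList (ns.map lk)).map (fun c => (c, ns.filter (fun g => lk g == c)))
        = (PySem.Set.ofList (ns.map lk)).map
            ((fun (q : Int × List String) => (q.1, PySem.List.sorted q.2 (fun x => x))) ∘
              (fun c => (c, (classDefs.filter (fun p => p.2 == c)).map Prod.fst))) := by
      apply List.map_congr_left; intro c _
      show (c, ns.filter (fun g => lk g == c))
        = (c, PySem.List.sorted ((classDefs.filter (fun p => p.2 == c)).map Prod.fst) (fun x => x))
      rw [hgrp c]
    rw [heq]
    exact hkeysperm.map _
  · exact head_pairwise ns lk hlt
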